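-- pv_equiv track=rewrite | github.com/ManojKumarPatnaik/practice-alg | Solution/FreeingStorageSpace.py | solution
-- ===== SOURCE A (Python) =====
-- def solution(A, R):
--   """Returns the maximum number of types of items that can be stored in the storeroom after freeing R consecutive shelves.
--
--   Args:
--     A: A list of integers representing the types of items stored on storeroom shelves.
--     R: The number of consecutive shelves to be freed.
--
--   Returns:
--     The maximum number of types of items that can still be stored in the storeroom after freeing R consecutive shelves.
--   """
--
--   # Get the length of the input array.
--   N = len(A)
--
--   # Initialize the maximum number of types of items that can still be stored in the storeroom.
--   maxTypes = 0
--
--   # Iterate over the possible start indices of the R consecutive shelves to be freed.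
--   for i in range(N - R + 1):
--     # Create a list of the items that will remain in the storeroom after freeing the R consecutive shelves.
--     afterFreeing = A[:i] + A[i + R:] if i > 0 else A[i + R:]
--
--     # Calculate the number of different types of items in the list.
--     currentTypes = len(set(afterFreeing))
--
--     # Update the maximum number of types of items that can still be stored in the storeroom.
--     maxTypes = max(maxTypes, currentTypes)
--
--   return maxTypes
-- ===== SOURCE B (Python) =====
-- def solution(A, R):
--   """Sliding window: keep counts of items outside the freed window and update
--   the distinct count incrementally (O(N) instead of O(N^2))."""
--   N = len(A)
--   cnt = {}
--   for x in A[R:]: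
--     cnt[x] = cnt.get(x, 0) + 1
--   distinct = len(cnt)
--   best = distinct
--   for i in range(N - R):
--     x = A[i]
--     cnt[x] = cnt.get(x, 0) + 1
--     if cnt[x] == 1:
--       distinct += 1
--     y = A[i + R]
--     cnt[y] = cnt.get(y, 0) - 1
--     if cnt[y] == 0:
--       distinct -= 1
--     best = max(best, distinct)
--   return best
-- ===== Notes on version B (the rewrite author's own statement) =====
-- stated objective: faster
-- what changed: Replaced the per-start rebuild of the remaining list and its set (O(N) work for each of the N-R+1 window positions) by a single sliding-window pass that keeps a count map of the items outside the freed window and updates the distinct count incrementally.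
-- outside the precondition, e.g. on solution([1, 2], -1): A returns 2, B raises IndexError
import Mathlib
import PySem

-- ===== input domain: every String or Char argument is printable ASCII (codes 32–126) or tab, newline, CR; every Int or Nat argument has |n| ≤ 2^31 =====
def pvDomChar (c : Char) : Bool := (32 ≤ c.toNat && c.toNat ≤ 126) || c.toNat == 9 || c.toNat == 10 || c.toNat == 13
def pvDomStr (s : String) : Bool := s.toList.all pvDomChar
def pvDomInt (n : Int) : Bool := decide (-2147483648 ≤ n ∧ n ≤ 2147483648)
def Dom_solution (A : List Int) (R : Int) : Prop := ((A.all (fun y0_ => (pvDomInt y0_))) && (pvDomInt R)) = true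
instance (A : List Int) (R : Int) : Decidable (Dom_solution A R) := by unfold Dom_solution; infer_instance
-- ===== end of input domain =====

-- B replaces A's per-window rebuild of the remaining list and its set by one sliding-window
-- pass keeping counts of the items outside the freed window (objective: faster).

-- ===== PORT A =====
def solution (A : List Int) (R : Int) : Int :=
  let N : Int := PySem.List.len A
  (PySem.List.pyRange 0 (N - R + 1) 1).foldl
    (fun maxTypes i =>
      let afterFreeing :=
        if i > 0 then PySem.List.slice A none (some i) ++ PySem.List.slice A (some (i + R)) none
        else PySem.List.slice A (some (i + R)) none
      let currentTypes := PySem.Set.len (PySem.Set.ofList afterFreeing)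
      max maxTypes currentTypes) 0

-- ===== PORT B =====
-- loop body of Source B's sliding-window pass (state: (cnt, distinct, best))
def solution_alt_step (A : List Int) (R : Int) (st : PySem.Dict Int Int × Int × Int) (i : Int) :
    PySem.Dict Int Int × Int × Int :=
  let cnt := st.1
  let distinct := st.2.1
  let best := st.2.2
  let x := PySem.List.pyGetD A i 0
  let cnt1 := cnt.insert x (cnt.getD x 0 + 1)
  let distinct1 := if cnt1.getD x 0 == 1 then distinct + 1 else distinct
  let y := PySem.List.pyGetD A (i + R) 0
  let cnt2 := cnt1.insert y (cnt1.getD y 0 - 1)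
  let distinct2 := if cnt2.getD y 0 == 0 then distinct1 - 1 else distinct1
  (cnt2, distinct2, max best distinct2)

def solution_alt (A : List Int) (R : Int) : Int :=
  let N : Int := PySem.List.len A
  let cnt : PySem.Dict Int Int :=
    (PySem.List.slice A (some R) none).foldl (fun d x => d.insert x (d.getD x 0 + 1)) PySem.Dict.empty
  let distinct : Int := (cnt.size : Int)
  let best : Int := distinct
  ((PySem.List.pyRange 0 (N - R) 1).foldl (solution_alt_step A R) (cnt, distinct, best)).2.2

-- ===== PRECONDITION & SPEC =====
-- Pre_ restricts to the task's natural domain: R counts shelves to free, so R ≥ 0.  For negative R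
-- (excluded) A still returns a value via Python's negative-slice wraparound, while B raises IndexError.
def Pre_solution (A : List Int) (R : Int) : Prop := 0 ≤ R
instance (A : List Int) (R : Int) : Decidable (Pre_solution A R) := by unfold Pre_solution; infer_instance
def pvWitness_solution : List Int × Int := ([1, 2, 1], 1)

def Spec_solution (A : List Int) (R : Int) (out : Int) : Prop := out = solution_alt A R
instance (A : List Int) (R : Int) (out : Int) : Decidable (Spec_solution A R out) := by unfold Spec_solution; infer_instance

-- ===== CLAIM (what is proved, stated in full; the proofs are below) =====
def Claim_equal_solution : Prop := ∀ (A : List Int) (R : Int), Dom_solution A R → Pre_solution A R → Spec_solution A R (solution A R)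

-- ===== LEMMAS AND PROOFS =====

-- the items left on the shelves when the window [k, k+r) is freed
def outsL (A : List Int) (r k : Nat) : List Int := A.take k ++ A.drop (k + r)
-- number of distinct remaining item types
def dcard (A : List Int) (r k : Nat) : Nat := (outsL A r k).toFinset.card
-- running maximum of dcard over window starts 0..k
def maxUp (A : List Int) (r : Nat) : Nat → Int
  | 0 => (dcard A r 0 : Int)
  | k+1 => max (maxUp A r k) (dcard A r (k+1))

def initSt (A : List Int) (r : Nat) : PySem.Dict Int Int × Int × Int :=
  let cnt := (A.drop r).foldl (fun d x => d.insert x (d.getD x 0 + 1)) PySem.Dict.empty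
  (cnt, (cnt.size : Int), (cnt.size : Int))

def Bst (A : List Int) (r k : Nat) : PySem.Dict Int Int × Int × Int :=
  (List.range k).foldl (fun st (j : Nat) => solution_alt_step A (r : Int) st (j : Int)) (initSt A r)

lemma len_ofList_toFinset (l : List Int) : (PySem.Set.ofList l).length = l.toFinset.card := by
  rw [← List.toFinset_card_of_nodup (PySem.Set.nodup_ofList l)]
  congr 1
  ext z
  simp [PySem.Set.mem_ofList]

lemma size_eq_keys_length (d : PySem.Dict Int Int) : d.size = d.keys.length := by
  simp [PySem.Dict.size, PySem.Dict.keys]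

-- A's loop body at iteration k computes the distinct count of outsL
lemma bodyA (A : List Int) (r k : Nat) :
    PySem.Set.len (PySem.Set.ofList
      (if (0 + (k : Int)) > 0 then
        PySem.List.slice A none (some (0 + (k : Int))) ++ PySem.List.slice A (some (0 + (k : Int) + (r : Int))) none
      else PySem.List.slice A (some (0 + (k : Int) + (r : Int))) none)) = (dcard A r k : Int) := by
  have hs : PySem.List.slice A (some (0 + (k : Int) + (r : Int))) none = A.drop (k + r) := by
    have : (0 + (k : Int) + (r : Int)) = ((k + r : Nat) : Int) := by push_cast; ring
    rw [this, PySem.List.slice_from_natCast]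
  cases k with
  | zero =>
    rw [if_neg (by norm_num)]
    simp only [PySem.Set.len, len_ofList_toFinset, hs]
    simp [dcard, outsL]
  | succ n =>
    rw [if_pos (by positivity)]
    have ht : PySem.List.slice A none (some (0 + ((n+1 : Nat) : Int))) = A.take (n+1) := by
      have : (0 + ((n+1 : Nat) : Int)) = ((n + 1 : Nat) : Int) := by push_cast; ring
      rw [this, PySem.List.slice_to_natCast]
    simp only [PySem.Set.len, len_ofList_toFinset, hs, ht]
    simp [dcard, outsL]

lemma solution_eq_foldl (A : List Int) (r : Nat) :
    solution A (r : Int) =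
      (List.range (A.length + 1 - r)).foldl (fun m k => max m ((dcard A r k : Int))) 0 := by
  have hn : ((A.length : Int) - (r : Int) + 1).toNat = A.length + 1 - r := by omega
  simp only [solution, PySem.List.len, PySem.List.pyRange_one, List.foldl_map]
  simp only [sub_zero, hn, bodyA]

lemma foldl_max_eq_maxUp (A : List Int) (r : Nat) :
    ∀ n, (List.range (n + 1)).foldl (fun m k => max m ((dcard A r k : Int))) 0 = maxUp A r n := by
  intro n
  induction n with
  | zero => simp [maxUp]
  | succ n ih => rw [List.range_succ, List.foldl_append, ih]; simp [maxUp]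

lemma take_succ_eq (A : List Int) (k : Nat) (h1 : k < A.length) :
    A.take (k+1) = A.take k ++ [A[k]] := by
  rw [List.take_succ, List.getElem?_eq_getElem h1, Option.toList_some]

lemma drop_eq (A : List Int) (n : Nat) (h : n < A.length) :
    A.drop n = A[n] :: A.drop (n+1) := List.drop_eq_getElem_cons h

lemma c_mid (A : List Int) (r k : Nat) (h1 : k < A.length) (z : Int) :
    (A.take (k+1) ++ A.drop (k + r)).count z
      = (outsL A r k).count z + if A[k] = z then 1 else 0 := by
  simp only [outsL, take_succ_eq A k h1, List.count_append, List.count_cons, List.count_nil,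
    beq_iff_eq]
  by_cases hxz : A[k] = z <;> simp [hxz] <;> omega

lemma c_out1 (A : List Int) (r k : Nat) (h2 : k + r < A.length) (z : Int) :
    (A.take (k+1) ++ A.drop (k + r)).count z
      = (outsL A r (k+1)).count z + if A[k+r] = z then 1 else 0 := by
  have e : k + 1 + r = k + r + 1 := by omega
  simp only [outsL, e, drop_eq A (k+r) h2, List.count_append, List.count_cons, beq_iff_eq]
  by_cases hyz : A[k+r] = z <;> simp [hyz] <;> omega

lemma fin_mid_k (A : List Int) (r k : Nat) (h1 : k < A.length) :
    (A.take (k+1) ++ A.drop (k + r)).toFinset = insert A[k] (outsL A r k).toFinset := by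
  ext z
  simp only [outsL, take_succ_eq A k h1, List.toFinset_append, Finset.mem_union,
    List.mem_toFinset, Finset.mem_insert, List.mem_append, List.mem_singleton]
  tauto

lemma fin_mid_k1 (A : List Int) (r k : Nat) (h2 : k + r < A.length) :
    (A.take (k+1) ++ A.drop (k + r)).toFinset = insert A[k+r] (outsL A r (k+1)).toFinset := by
  have e : k + 1 + r = k + r + 1 := by omega
  ext z
  simp only [outsL, e, drop_eq A (k+r) h2, List.toFinset_append, Finset.mem_union,
    List.mem_toFinset, Finset.mem_insert, List.mem_append, List.mem_cons]
  tauto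

lemma step_spec (A : List Int) (r k : Nat) (st : PySem.Dict Int Int × Int × Int)
    (h1 : k < A.length) (h2 : k + r < A.length)
    (hc : ∀ z, st.1.getD z 0 = ((outsL A r k).count z : Int))
    (hd : st.2.1 = (dcard A r k : Int)) :
    (∀ z, (solution_alt_step A (r : Int) st (k : Int)).1.getD z 0 = ((outsL A r (k+1)).count z : Int)) ∧
    (solution_alt_step A (r : Int) st (k : Int)).2.1 = (dcard A r (k+1) : Int) ∧
    (solution_alt_step A (r : Int) st (k : Int)).2.2 = max st.2.2 (dcard A r (k+1) : Int) := by
  obtain ⟨cnt, dist, best⟩ := st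
  simp only at hc hd
  set mid := A.take (k+1) ++ A.drop (k + r) with hmid
  have hx : PySem.List.pyGetD A (k : Int) 0 = A[k] := by
    rw [PySem.List.pyGetD_natCast, List.getD_eq_getElem _ _ h1]
  have hy : PySem.List.pyGetD A ((k : Int) + (r : Int)) 0 = A[k+r] := by
    have : (k : Int) + (r : Int) = ((k + r : Nat) : Int) := by push_cast; ring
    rw [this, PySem.List.pyGetD_natCast, List.getD_eq_getElem _ _ h2]
  simp only [solution_alt_step, hx, hy]
  set cnt1 := cnt.insert A[k] (cnt.getD A[k] 0 + 1) with hcnt1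
  have g1 : ∀ z, cnt1.getD z 0 = (mid.count z : Int) := by
    intro z
    rw [hcnt1, PySem.Dict.getD_insert, c_mid A r k h1 z, hc z, hc A[k]]
    by_cases hz : z = A[k]
    · subst hz; simp
    · rw [if_neg hz, if_neg (fun h => hz h.symm)]; push_cast; ring
  have hcx : cnt1.getD A[k] 0 = ((outsL A r k).count A[k] : Int) + 1 := by
    rw [hcnt1, PySem.Dict.getD_insert_self, hc A[k]]
  have g2 : (if cnt1.getD A[k] 0 == 1 then dist + 1 else dist) = (mid.toFinset.card : Int) := by
    by_cases hmem : A[k] ∈ outsL A r k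
    · have hpos : 0 < (outsL A r k).count A[k] := List.count_pos_iff.mpr hmem
      have : (cnt1.getD A[k] 0 == 1) = false := by
        rw [hcx]; simp only [beq_eq_false_iff_ne]; intro h; omega
      rw [this, if_neg (by simp), hd, hmid, fin_mid_k A r k h1,
        Finset.insert_eq_self.mpr (List.mem_toFinset.mpr hmem)]
      rfl
    · have hz : (outsL A r k).count A[k] = 0 := List.count_eq_zero.mpr hmem
      have : (cnt1.getD A[k] 0 == 1) = true := by rw [hcx, hz]; simp
      rw [this, if_pos rfl, hd, hmid, fin_mid_k A r k h1,
        Finset.card_insert_of_notMem (fun hmm => hmem (List.mem_toFinset.mp hmm))]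
      unfold dcard; push_cast; ring
  set cnt2 := cnt1.insert A[k+r] (cnt1.getD A[k+r] 0 - 1) with hcnt2
  have hmy : mid.count A[k+r] = (outsL A r (k+1)).count A[k+r] + 1 := by
    rw [hmid, c_out1 A r k h2, if_pos rfl]
  have g3 : ∀ z, cnt2.getD z 0 = ((outsL A r (k+1)).count z : Int) := by
    intro z
    rw [hcnt2, PySem.Dict.getD_insert]
    by_cases hz : z = A[k+r]
    · subst hz; rw [if_pos rfl, g1, hmy]; push_cast; ring
    · rw [if_neg hz, g1 z, hmid, c_out1 A r k h2 z, if_neg (fun h => hz h.symm)]; push_cast; ring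
  have hcy : cnt2.getD A[k+r] 0 = ((outsL A r (k+1)).count A[k+r] : Int) := g3 A[k+r]
  have g4 : (if cnt2.getD A[k+r] 0 == 0 then (mid.toFinset.card : Int) - 1 else (mid.toFinset.card : Int))
      = (dcard A r (k+1) : Int) := by
    by_cases hmem : A[k+r] ∈ outsL A r (k+1)
    · have hpos : 0 < (outsL A r (k+1)).count A[k+r] := List.count_pos_iff.mpr hmem
      have : (cnt2.getD A[k+r] 0 == 0) = false := by
        rw [hcy]; simp only [beq_eq_false_iff_ne]; intro h; omega
      rw [this, if_neg (by simp), hmid, fin_mid_k1 A r k h2,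
        Finset.insert_eq_self.mpr (List.mem_toFinset.mpr hmem)]
      rfl
    · have hz : (outsL A r (k+1)).count A[k+r] = 0 := List.count_eq_zero.mpr hmem
      have : (cnt2.getD A[k+r] 0 == 0) = true := by rw [hcy, hz]; simp
      rw [this, if_pos rfl, hmid, fin_mid_k1 A r k h2,
        Finset.card_insert_of_notMem (fun hmm => hmem (List.mem_toFinset.mp hmm))]
      unfold dcard; push_cast; ring
  refine ⟨g3, ?_, ?_⟩
  · simp only [← hcnt1, ← hcnt2, g2, g4]
  · simp only [← hcnt1, ← hcnt2, g2, g4]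

lemma init_spec (A : List Int) (r : Nat) :
    (∀ z, (initSt A r).1.getD z 0 = ((outsL A r 0).count z : Int)) ∧
    (initSt A r).2.1 = (dcard A r 0 : Int) := by
  constructor
  · intro z
    simp only [initSt]
    rw [PySem.Dict.getD_foldl_insert_add_one, PySem.Dict.getD_empty]
    simp [outsL]
  · simp only [initSt]
    rw [PySem.Dict.foldl_insert_getD_add_one_eq_counter, size_eq_keys_length,
      PySem.Dict.keys_counter, len_ofList_toFinset]
    simp [dcard, outsL]

lemma Bst_succ (A : List Int) (r k : Nat) :
    Bst A r (k+1) = solution_alt_step A (r : Int) (Bst A r k) (k : Int) := by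
  simp [Bst, List.range_succ]

lemma invariant (A : List Int) (r : Nat) :
    ∀ k, k + r ≤ A.length →
      (∀ z, (Bst A r k).1.getD z 0 = ((outsL A r k).count z : Int)) ∧
      (Bst A r k).2.1 = (dcard A r k : Int) ∧
      (Bst A r k).2.2 = maxUp A r k := by
  intro k
  induction k with
  | zero =>
    intro _
    obtain ⟨h1, h2⟩ := init_spec A r
    exact ⟨h1, h2, h2⟩
  | succ k ih =>
    intro hle
    obtain ⟨ihc, ihd, ihb⟩ := ih (by omega)
    have h1 : k < A.length := by omega
    have h2 : k + r < A.length := by omega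
    obtain ⟨gc, gd, gb⟩ := step_spec A r k (Bst A r k) h1 h2 ihc ihd
    rw [Bst_succ]
    exact ⟨gc, gd, by rw [gb, ihb]; rfl⟩

lemma solution_alt_eq (A : List Int) (r : Nat) (h : r ≤ A.length) :
    solution_alt A (r : Int) = (Bst A r (A.length - r)).2.2 := by
  have hn : ((A.length : Int) - (r : Int)).toNat = A.length - r := by omega
  conv_lhs => simp only [solution_alt, PySem.List.len, PySem.List.pyRange_one, List.foldl_map,
    PySem.List.slice_from_natCast, sub_zero, hn, zero_add]
  unfold Bst initSt
  rfl

lemma equiv_nonneg (A : List Int) (r : Nat) : solution A (r : Int) = solution_alt A (r : Int) := by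
  by_cases h : r ≤ A.length
  · have hn : A.length + 1 - r = (A.length - r) + 1 := by omega
    rw [solution_eq_foldl, hn, foldl_max_eq_maxUp, solution_alt_eq A r h,
      (invariant A r (A.length - r) (by omega)).2.2]
  · have hn : A.length + 1 - r = 0 := by omega
    rw [solution_eq_foldl, hn]
    have hd : A.drop r = [] := List.drop_eq_nil_of_le (by omega)
    have hp : PySem.List.pyRange 0 ((A.length : Int) - (r : Int)) 1 = [] :=
      PySem.List.pyRange_one_eq_nil (by omega)
    simp only [solution_alt, PySem.List.len, PySem.List.slice_from_natCast, hd, hp,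
      List.foldl_nil, List.range_zero]
    simp [PySem.Dict.size_empty]

-- ===== VERDICT (by name: the statement is the Claim_ definition above) =====
theorem solution_spec : Claim_equal_solution := by
  intro A R _ hR
  unfold Spec_solution
  have h : R = ((R.toNat : Nat) : Int) := (Int.toNat_of_nonneg hR).symm
  rw [h, equiv_nonneg]
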